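-- pv_equiv track=rewrite | github.com/Pamjei/CS12 | MODULE 4 - recursion/PA 11 - LABS Amplify Basic Skills 2.py | realz
-- ===== SOURCE A (Python) =====
-- def realz(acronym, orig, N):
--     if N == 0:
--         return acronym
--     else:
--         words = acronym.split()
--         for x in range(len(words)):
--             if words[x].isupper():
--                 words[x] = orig
--         words = " ".join(str(x) for x in words)
--         return realz(words, orig, N-1)
-- ===== SOURCE B (Python) =====
-- def realz(acronym, orig, N):
--     for _ in range(N):
--         acronym = " ".join(orig if w.isupper() else w for w in acronym.split())
--     return acronym
-- ===== Notes on version B (the rewrite author's own statement) =====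
-- stated objective: idiomatic
-- what changed: Replaced the recursion over the counter N by an iterative for-loop over range(N), and the in-place indexed mutation of the word list by a single generator expression fed to join.
import Mathlib
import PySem

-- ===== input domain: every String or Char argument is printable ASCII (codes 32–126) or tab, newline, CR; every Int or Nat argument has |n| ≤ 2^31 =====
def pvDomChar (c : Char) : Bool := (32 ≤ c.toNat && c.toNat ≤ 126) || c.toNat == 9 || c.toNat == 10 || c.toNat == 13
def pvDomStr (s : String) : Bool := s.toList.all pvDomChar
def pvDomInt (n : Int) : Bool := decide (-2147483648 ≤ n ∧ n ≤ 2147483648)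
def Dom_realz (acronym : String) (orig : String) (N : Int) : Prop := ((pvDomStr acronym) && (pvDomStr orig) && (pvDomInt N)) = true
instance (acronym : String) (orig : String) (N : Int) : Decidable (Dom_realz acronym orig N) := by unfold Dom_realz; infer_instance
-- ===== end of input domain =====

-- Header: B replaces A's recursion over N by an iterative loop and the indexed
-- in-place word mutation by a map; same return value for every N >= 0 (A raises
-- RecursionError for N < 0, where B returns acronym unchanged).

-- ===== PORT A =====
-- hand-ported str.isupper (exact on ASCII: cased chars are the letters):
-- at least one cased char and no lowercase char
def pyStrIsupper (s : String) : Bool :=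
  s.toList.any (fun c => PySem.Chars.isupper c || PySem.Chars.islower c) &&
  s.toList.all (fun c => !(PySem.Chars.islower c))

-- the for-x-in-range(len(words)) loop mutating words[x]
def realzLoopA (orig : String) (ws : List String) : List String :=
  (List.range ws.length).foldl
    (fun ws x => if pyStrIsupper (ws.getD x "") then ws.set x orig else ws) ws

-- A's recursion, with the Int counter run as fuel (A only returns for N >= 0;
-- for N < 0 Python A raises RecursionError, excluded by Pre_realz)
def realzAux (orig : String) : Nat → String → String
  | 0, acr => acr
  | n+1, acr =>
    let words := PySem.Str.split₀ acr
    let words := realzLoopA orig words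
    let words := PySem.Str.join " " (words.map (fun x => x))  -- str(x) on a str is x
    realzAux orig n words

def realz (acronym : String) (orig : String) (N : Int) : String :=
  realzAux orig N.toNat acronym

-- ===== PORT B =====
def realzStepB (orig : String) (acr : String) : String :=
  PySem.Str.join " "
    ((PySem.Str.split₀ acr).map (fun w => if pyStrIsupper w then orig else w))

def realz_alt (acronym : String) (orig : String) (N : Int) : String :=
  (PySem.List.pyRange 0 N 1).foldl (fun acr _ => realzStepB orig acr) acronym

-- ===== PRECONDITION & SPEC =====
-- Pre_ excludes N < 0, on which Python A recurses forever and raises RecursionError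
-- (B would return acronym unchanged there); A returns on every input with N ≥ 0.
def Pre_realz (acronym : String) (orig : String) (N : Int) : Prop := 0 ≤ N
instance (acronym : String) (orig : String) (N : Int) : Decidable (Pre_realz acronym orig N) := by unfold Pre_realz; infer_instance
def pvWitness_realz : String × String × Int := ("NASA sent a ROVER", "rover", 2)

def Spec_realz (acronym : String) (orig : String) (N : Int) (out : String) : Prop := out = realz_alt acronym orig N
instance (acronym : String) (orig : String) (N : Int) (out : String) : Decidable (Spec_realz acronym orig N out) := by unfold Spec_realz; infer_instance

-- ===== CLAIM (what is proved, stated in full; the proofs are below) =====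
def Claim_equal_realz : Prop := ∀ (acronym : String) (orig : String) (N : Int), Dom_realz acronym orig N → Pre_realz acronym orig N → Spec_realz acronym orig N (realz acronym orig N)

-- ===== LEMMAS AND PROOFS =====

-- the in-place indexed loop equals the map
theorem realzLoopA_aux (orig : String) (pre suf : List String) :
    (List.range' pre.length suf.length).foldl
      (fun ws x => if pyStrIsupper (ws.getD x "") then ws.set x orig else ws) (pre ++ suf)
    = pre ++ suf.map (fun w => if pyStrIsupper w then orig else w) := by
  induction suf generalizing pre with
  | nil => simp
  | cons w rest ih =>
    simp only [List.length_cons, List.range'_succ, List.foldl_cons]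
    have hget : (pre ++ w :: rest).getD pre.length "" = w := by
      simp [List.getD]
    have hset : (pre ++ w :: rest).set pre.length orig = pre ++ orig :: rest := by
      rw [List.set_append]
      simp
    have key : ∀ v : List String, v = pre ++ (if pyStrIsupper w then orig else w) :: rest →
        (List.range' (pre.length + 1) rest.length).foldl
          (fun ws x => if pyStrIsupper (ws.getD x "") then ws.set x orig else ws) v
        = pre ++ (if pyStrIsupper w then orig else w) :: rest.map (fun y => if pyStrIsupper y then orig else y) := by
      intro v hv
      have := ih (pre ++ [if pyStrIsupper w then orig else w])
      simpa [hv, List.length_append] using this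
    rw [hget]
    by_cases h : pyStrIsupper w
    · simp only [h, if_pos, hset]
      exact key _ (by simp [h])
    · simp only [h, if_neg, Bool.false_eq_true, not_false_iff]
      simpa [h] using key (pre ++ w :: rest) (by simp [h])

theorem realzLoopA_eq (orig : String) (ws : List String) :
    realzLoopA orig ws = ws.map (fun w => if pyStrIsupper w then orig else w) := by
  have := realzLoopA_aux orig [] ws
  simpa [realzLoopA, List.range_eq_range'] using this

theorem stepA_eq_stepB (orig acr : String) :
    PySem.Str.join " " ((realzLoopA orig (PySem.Str.split₀ acr)).map (fun x => x))
    = realzStepB orig acr := by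
  rw [realzLoopA_eq]
  unfold realzStepB
  congr 1
  rw [List.map_map]
  rfl

theorem realzAux_eq_iter (orig : String) (n : Nat) (acr : String) :
    realzAux orig n acr = (realzStepB orig)^[n] acr := by
  induction n generalizing acr with
  | zero => simp [realzAux]
  | succ m ih =>
    rw [Function.iterate_succ_apply]
    simp only [realzAux]
    rw [stepA_eq_stepB]
    exact ih _

theorem foldl_const_iter (g : String → String) (l : List Int) (a : String) :
    l.foldl (fun acr _ => g acr) a = g^[l.length] a := by
  induction l generalizing a with
  | nil => rfl
  | cons x xs ih => simp [List.foldl_cons, Function.iterate_succ_apply, ih]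

theorem pyRange_length (N : Int) (h : 0 ≤ N) :
    (PySem.List.pyRange 0 N 1).length = N.toNat := by
  rw [PySem.List.length_pyRange_one]
  omega

-- ===== VERDICT (by name: the statement is the Claim_ definition above) =====
theorem realz_spec : Claim_equal_realz := by
  intro acronym orig N _ hpre
  unfold Spec_realz realz realz_alt
  rw [realzAux_eq_iter, foldl_const_iter, pyRange_length N hpre]
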